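-- pv_equiv track=rewrite | github.com/aman1108/Interview-Coding-Questions | Extras/Restore Array from Adjacent Pairs.py | solve
-- ===== SOURCE A (Python) =====
-- from collections import defaultdict
--
-- def solve(nums):
--     n=len(nums)
--     G=defaultdict(list)
--
--     for a,b in nums:
--         G[a].append(b)
--         G[b].append(a)
--
--     Q=[]
--     for v in G:
--         if (len(G[v])==1):
--             Q=[v]
--             break
--
--     ans=[]
--     s=set()
--     while(len(Q)!=0):
--         a=Q.pop()
--         ans.append(a)
--         s.add(a)
--         for b in G[a]:
--             if b not in s:
--                 Q.append(b)
--     return ans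
-- ===== SOURCE B (Python) =====
-- # B: recursive depth-first walk threading (output, seen) functionally,
-- # instead of A's explicit stack + mutated visited set.
-- from collections import defaultdict
--
-- def solve(nums):
--     adj = defaultdict(list)
--     for a, b in nums:
--         adj[a].append(b)
--         adj[b].append(a)
--     start = next((v for v in adj if len(adj[v]) == 1), None)
--     if start is None:
--         return []
--
--     def walk(pending, seen):
--         if not pending:
--             return [], seen
--         a, rest = pending[0], pending[1:]
--         seen = seen | {a}
--         kids = [b for b in adj[a] if b not in seen][::-1]
--         out1, seen = walk(kids, seen)
--         out2, seen = walk(rest, seen)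
--         return [a] + out1 + out2, seen
--
--     return walk([start], set())[0]
-- ===== Notes on version B (the rewrite author's own statement) =====
-- stated objective: alternative
-- what changed: A's explicit stack with a mutated visited set is replaced by a recursive depth-first walk that threads the (output, seen) pair functionally through the call tree; same adjacency build and start choice, same O(V+E) traversal.
import Mathlib
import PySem

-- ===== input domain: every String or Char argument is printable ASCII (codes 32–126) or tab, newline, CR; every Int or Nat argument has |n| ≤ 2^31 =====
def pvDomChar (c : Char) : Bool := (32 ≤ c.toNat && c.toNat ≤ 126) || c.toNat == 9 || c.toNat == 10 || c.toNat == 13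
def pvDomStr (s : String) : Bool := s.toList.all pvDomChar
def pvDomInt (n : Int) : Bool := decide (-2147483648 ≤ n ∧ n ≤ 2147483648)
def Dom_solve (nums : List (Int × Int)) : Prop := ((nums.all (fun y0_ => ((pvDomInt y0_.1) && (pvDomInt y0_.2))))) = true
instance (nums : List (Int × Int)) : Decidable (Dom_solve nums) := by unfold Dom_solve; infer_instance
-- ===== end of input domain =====

-- B replaces A's explicit stack + mutated visited set by a recursive walk threading
-- (output, seen) functionally; same return value, similar cost (objective: alternative).

-- ===== PORT A =====
-- adjacency build, identical line in both Pythons: 'for a,b in nums: G[a].append(b); G[b].append(a)'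
def pvBuildG (nums : List (Int × Int)) : PySem.Dict Int (List Int) :=
  nums.foldl (fun G p => (G.modify p.1 [] (fun l => l ++ [p.2])).modify p.2 [] (fun l => l ++ [p.1]))
    PySem.Dict.empty

-- A's while loop: pop from the END of Q, append to ans, mark, push unseen neighbours
-- (fuel only guards the loop; 2*len(nums)+2 is never exhausted: each of the 2*len(nums)
-- adjacency entries causes at most one push)
def pvLoopA (G : PySem.Dict Int (List Int)) : Nat → List Int → PySem.Set Int → List Int → List Int
  | 0, _, _, ans => ans
  | f + 1, Q, s, ans =>
    match PySem.List.pop? Q with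
    | none => ans
    | some (a, Q') =>
      let ans' := ans ++ [a]
      let s' := PySem.Set.add s a
      let Q'' := (G.getD a []).foldl (fun q b => if PySem.Set.contains s' b then q else q ++ [b]) Q'
      pvLoopA G f Q'' s' ans'

def solve (nums : List (Int × Int)) : List Int :=
  let G := pvBuildG nums
  let Q : List Int :=
    match G.keys.find? (fun v => (G.getD v []).length == 1) with
    | some v => [v]
    | none => []
  pvLoopA G (2 * nums.length + 2) Q PySem.Set.empty []

-- ===== PORT B =====
-- B's recursive 'walk(pending, seen)': visit the head, recurse into its (reversed, unseen)
-- neighbour list, then into the rest, returning ([a] + out1 + out2, seen); fuel is threaded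
-- linearly through the recursion and returned (the 'min' only makes totality evident).
def pvWalkB (adj : PySem.Dict Int (List Int)) : Nat → List Int → PySem.Set Int → List Int × PySem.Set Int × Nat
  | f, [], s => ([], s, f)
  | 0, _ :: _, s => ([], s, 0)
  | f + 1, a :: rest, s =>
    let s1 := PySem.Set.add s a
    let kids := ((adj.getD a []).filter (fun b => !PySem.Set.contains s1 b)).reverse
    let r1 := pvWalkB adj f kids s1
    let r2 := pvWalkB adj (min r1.2.2 f) rest r1.2.1
    ([a] ++ r1.1 ++ r2.1, r2.2.1, r2.2.2)
  termination_by f xs => (f, xs.length)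
  decreasing_by
    · exact Prod.Lex.left _ _ (Nat.lt_succ_self f)
    · exact Prod.Lex.left _ _ (Nat.lt_succ_of_le (Nat.min_le_right _ _))

def solve_alt (nums : List (Int × Int)) : List Int :=
  let adj := pvBuildG nums
  match adj.keys.find? (fun v => (adj.getD v []).length == 1) with
  | none => []
  | some start => (pvWalkB adj (2 * nums.length + 2) [start] PySem.Set.empty).1

-- ===== PRECONDITION & SPEC =====
def Spec_solve (nums : List (Int × Int)) (out : List Int) : Prop := out = solve_alt nums
instance (nums : List (Int × Int)) (out : List Int) : Decidable (Spec_solve nums out) := by unfold Spec_solve; infer_instance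

-- ===== CLAIM (what is proved, stated in full; the proofs are below) =====
def Claim_equal_solve : Prop := ∀ (nums : List (Int × Int)), Dom_solve nums → Spec_solve nums (solve nums)

-- ===== LEMMAS AND PROOFS =====

-- out of fuel, the walk emits nothing and keeps the state
theorem pvWalkB_zero (adj : PySem.Dict Int (List Int)) (xs : List Int) (s : PySem.Set Int) :
    pvWalkB adj 0 xs s = ([], s, 0) := by cases xs <;> simp [pvWalkB]

-- the walk never returns more fuel than it was given (lets 'min r1.2.2 f' reduce to 'r1.2.2')
theorem pvWalkB_fuel_le (adj : PySem.Dict Int (List Int)) :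
    ∀ (f : Nat) (xs : List Int) (s : PySem.Set Int), (pvWalkB adj f xs s).2.2 ≤ f := by
  intro f xs s
  induction f, xs, s using pvWalkB.induct adj with
  | case1 => simp [pvWalkB]
  | case2 => simp [pvWalkB]
  | case3 f a rest s _s1 _kids _r1 ih1 ih2 ih3 =>
      simp only [pvWalkB]
      exact Nat.le_succ_of_le (le_trans ih3 (Nat.min_le_right _ _))

-- the walk splits over list append, threading seen and fuel left to right
theorem pvWalkB_append (adj : PySem.Dict Int (List Int)) :
    ∀ (f : Nat) (xs ys : List Int) (s : PySem.Set Int),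
      pvWalkB adj f (xs ++ ys) s =
        (let r1 := pvWalkB adj f xs s
         let r2 := pvWalkB adj r1.2.2 ys r1.2.1
         (r1.1 ++ r2.1, r2.2.1, r2.2.2)) := by
  intro f
  induction f using Nat.strong_induction_on with
  | _ f ih =>
    intro xs ys s
    match f, xs with
    | f, [] => simp [pvWalkB]
    | 0, a :: rest => simp [pvWalkB_zero]
    | f + 1, a :: rest =>
      simp only [List.cons_append, pvWalkB]
      rw [ih _ (Nat.lt_succ_of_le (Nat.min_le_right _ _)) rest ys]
      simp

-- A's pushing loop 'for b in G[a]: if b not in s: Q.append(b)' appends the unseen neighbours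
theorem pvPush_eq (s' : PySem.Set Int) (l Q : List Int) :
    l.foldl (fun q b => if PySem.Set.contains s' b then q else q ++ [b]) Q
      = Q ++ l.filter (fun b => !PySem.Set.contains s' b) := by
  rw [show (fun q b => if PySem.Set.contains s' b then q else q ++ [b])
        = (fun q b => if (!PySem.Set.contains s' b) = true then q ++ [b] else q) from by
      funext q b; cases h : PySem.Set.contains s' b <;> simp]
  exact PySem.List.foldl_append_if_eq_filter _ l Q

-- A's stack loop computes B's walk on the reversed stack (any fuel, threaded identically)
theorem pvLoopA_eq_walk (G : PySem.Dict Int (List Int)) :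
    ∀ (f : Nat) (Q : List Int) (s : PySem.Set Int) (ans : List Int),
      pvLoopA G f Q s ans = ans ++ (pvWalkB G f Q.reverse s).1 := by
  intro f
  induction f with
  | zero => intro Q s ans; simp [pvLoopA, pvWalkB_zero]
  | succ f ih =>
    intro Q s ans
    rcases List.eq_nil_or_concat Q with rfl | ⟨Q', a, rfl⟩
    · simp [pvLoopA, pvWalkB, PySem.List.pop?]
    · simp only [List.concat_eq_append]
      have hmin : min (pvWalkB G f ((G.getD a []).filter
          (fun b => !PySem.Set.contains (PySem.Set.add s a) b)).reverse (PySem.Set.add s a)).2.2 f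
          = (pvWalkB G f ((G.getD a []).filter
          (fun b => !PySem.Set.contains (PySem.Set.add s a) b)).reverse (PySem.Set.add s a)).2.2 :=
        Nat.min_eq_left (pvWalkB_fuel_le G f _ _)
      simp only [pvLoopA, PySem.List.pop?_last, pvPush_eq]
      rw [ih]
      simp only [List.reverse_append, List.reverse_cons, List.reverse_nil, List.nil_append,
        List.cons_append, pvWalkB, hmin, pvWalkB_append]
      simp

-- ===== VERDICT (by name: the statement is the Claim_ definition above) =====
theorem solve_spec : Claim_equal_solve := by
  intro nums _
  unfold Spec_solve solve solve_alt
  cases hfind : (pvBuildG nums).keys.find? (fun v => ((pvBuildG nums).getD v []).length == 1) with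
  | none => simp only [hfind]; simp [pvLoopA, PySem.List.pop?]
  | some v => simp only [hfind, pvLoopA_eq_walk]; simp
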